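-- pv_equiv track=rewrite | github.com/ucrbioinfo/PGV | pgv/merge.py | find_max_mismatch
-- ===== SOURCE A (Python) =====
-- def find_max_mismatch(aln, path):
-- 	curr_len = max_len = 0
-- 	curr_s = curr_e = max_s = max_e = 0
-- 	for i in range(len(aln)):
-- 		if aln[i][0] != aln[i][1]:
-- 			curr_len += 1
-- 			curr_e = i
-- 		else:
-- 			if curr_len > max_len:
-- 				max_s = curr_s
-- 				max_e = curr_e
-- 				max_len = curr_len
-- 			curr_len = 0
-- 			curr_s = i+1
-- 	if curr_len > max_len:
-- 		max_s = curr_s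
-- 		max_e = curr_e
-- 		max_len = curr_len
--
-- 	while aln[max_s][1] == '-':
-- 		max_s += 1
-- 		max_len -= 1
-- 	while aln[max_e][1] == '-':
-- 		max_e -= 1
-- 		max_len -= 1
--
-- 	return max_len, path.index(aln[max_s][1]), path.index(aln[max_e][1])
-- ===== SOURCE B (Python) =====
-- def find_max_mismatch(aln, path):
--     # Pass 1: materialize every maximal mismatch run as (start, end, length).
--     runs = []
--     start = None
--     for i, (x, y) in enumerate(aln):
--         if x != y:
--             if start is None:
--                 start = i
--         else:
--             if start is not None:
--                 runs.append((start, i - 1, i - start))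
--                 start = None
--     if start is not None:
--         runs.append((start, len(aln) - 1, len(aln) - start))
--     # Pass 2: first run of maximal length (strict > keeps the earliest).
--     max_s, max_e, max_len = 0, 0, 0
--     for s, e, l in runs:
--         if l > max_len:
--             max_s, max_e, max_len = s, e, l
--     # Trim gaps from both ends, as in the original.
--     while aln[max_s][1] == '-':
--         max_s += 1
--         max_len -= 1
--     while aln[max_e][1] == '-':
--         max_e -= 1
--         max_len -= 1
--     return max_len, path.index(aln[max_s][1]), path.index(aln[max_e][1])
-- ===== Notes on version B (the rewrite author's own statement) =====
-- stated objective: alternative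
-- what changed: B materializes all maximal mismatch runs (start,end,length) in one pass and then selects the first longest run in a separate reduction, instead of A's fused scan carrying six running counters; the gap-trim loops and path lookups are unchanged.
import Mathlib
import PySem

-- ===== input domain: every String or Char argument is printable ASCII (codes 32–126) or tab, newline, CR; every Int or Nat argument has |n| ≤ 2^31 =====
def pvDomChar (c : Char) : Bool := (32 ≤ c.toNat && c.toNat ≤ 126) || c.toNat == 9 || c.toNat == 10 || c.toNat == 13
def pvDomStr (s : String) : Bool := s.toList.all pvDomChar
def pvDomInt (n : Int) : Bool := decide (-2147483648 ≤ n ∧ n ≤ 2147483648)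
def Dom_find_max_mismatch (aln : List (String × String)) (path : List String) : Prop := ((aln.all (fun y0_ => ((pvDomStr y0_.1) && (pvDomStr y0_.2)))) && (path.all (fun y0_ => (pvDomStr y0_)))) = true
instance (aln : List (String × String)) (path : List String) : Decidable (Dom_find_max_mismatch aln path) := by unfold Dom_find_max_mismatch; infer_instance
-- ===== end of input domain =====

-- B replaces A's fused six-counter scan by a materialize-runs pass plus a separate
-- first-longest-run reduction (objective: alternative decomposition, same cost).

-- ===== PORT A =====
-- loop body of A's for-loop: state (curr_len, curr_s, curr_e, max_len, max_s, max_e), event (i, aln[i])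
def pvStepA (t : Int × Int × Int × Int × Int × Int) (e : Int × (String × String)) :
    Int × Int × Int × Int × Int × Int :=
  if e.2.1 ≠ e.2.2 then
    (t.1 + 1, t.2.1, e.1, t.2.2.2.1, t.2.2.2.2.1, t.2.2.2.2.2)
  else if t.1 > t.2.2.2.1 then
    (0, e.1 + 1, t.2.2.1, t.1, t.2.1, t.2.2.1)
  else
    (0, e.1 + 1, t.2.2.1, t.2.2.2.1, t.2.2.2.2.1, t.2.2.2.2.2)

-- 'while aln[max_s][1] == '-': max_s += 1; max_len -= 1'  (fuel-bounded; fuel suffices under Pre_)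
def pvTrimFwdA (aln : List (String × String)) : Nat → Int × Int → Int × Int
  | 0, sl => sl
  | f + 1, (s, l) =>
    if (PySem.List.pyGetD aln s ("", "")).2 = "-" then pvTrimFwdA aln f (s + 1, l - 1) else (s, l)

-- 'while aln[max_e][1] == '-': max_e -= 1; max_len -= 1'
def pvTrimBwdA (aln : List (String × String)) : Nat → Int × Int → Int × Int
  | 0, sl => sl
  | f + 1, (s, l) =>
    if (PySem.List.pyGetD aln s ("", "")).2 = "-" then pvTrimBwdA aln f (s - 1, l - 1) else (s, l)

def find_max_mismatch (aln : List (String × String)) (path : List String) : Int × Int × Int :=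
  match (PySem.List.pyRange 0 (PySem.List.len aln) 1).foldl
      (fun t i => pvStepA t (i, PySem.List.pyGetD aln i ("", ""))) (0, 0, 0, 0, 0, 0) with
  | (cl, cs, ce, ml, ms, me) =>
    match (if cl > ml then (cl, cs, ce) else (ml, ms, me) : Int × Int × Int) with
    | (ml, ms, me) =>
      match pvTrimFwdA aln (aln.length + 1) (ms, ml) with
      | (ms, ml) =>
        match pvTrimBwdA aln (aln.length + 1) (me, ml) with
        | (me, ml) =>
          (ml,
           (((PySem.List.index? path (PySem.List.pyGetD aln ms ("", "")).2).getD 0 : Nat) : Int),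
           (((PySem.List.index? path (PySem.List.pyGetD aln me ("", "")).2).getD 0 : Nat) : Int))

-- ===== PORT B =====
-- run-builder loop body: state (runs, start), event (i, (x, y))
def pvStepRuns (st : List (Int × Int × Int) × Option Int) (e : Int × (String × String)) :
    List (Int × Int × Int) × Option Int :=
  if e.2.1 ≠ e.2.2 then
    match st.2 with
    | none => (st.1, some e.1)
    | some s0 => (st.1, some s0)
  else
    match st.2 with
    | some s0 => (st.1 ++ [(s0, e.1 - 1, e.1 - s0)], none)
    | none => st

-- pass 1: all maximal mismatch runs as (start, end, length), in order
def pvRunsB (aln : List (String × String)) : List (Int × Int × Int) :=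
  match (PySem.List.enumerate aln 0).foldl pvStepRuns ([], none) with
  | (rs, some s0) => rs ++ [(s0, (PySem.List.len aln) - 1, (PySem.List.len aln) - s0)]
  | (rs, none) => rs

-- pass 2: first run of maximal length (strict '>' keeps the earliest), default (0, 0, 0)
def pvBestRun (runs : List (Int × Int × Int)) : Int × Int × Int :=
  runs.foldl (fun acc r => if r.2.2 > acc.2.2 then r else acc) ((0 : Int), (0 : Int), (0 : Int))

def pvTrimFwdB (aln : List (String × String)) : Nat → Int × Int → Int × Int
  | 0, sl => sl
  | f + 1, (s, l) =>
    if (PySem.List.pyGetD aln s ("", "")).2 = "-" then pvTrimFwdB aln f (s + 1, l - 1) else (s, l)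

def pvTrimBwdB (aln : List (String × String)) : Nat → Int × Int → Int × Int
  | 0, sl => sl
  | f + 1, (s, l) =>
    if (PySem.List.pyGetD aln s ("", "")).2 = "-" then pvTrimBwdB aln f (s - 1, l - 1) else (s, l)

def find_max_mismatch_alt (aln : List (String × String)) (path : List String) : Int × Int × Int :=
  match pvBestRun (pvRunsB aln) with
  | (ms, me, ml) =>
    match pvTrimFwdB aln (aln.length + 1) (ms, ml) with
    | (ms, ml) =>
      match pvTrimBwdB aln (aln.length + 1) (me, ml) with
      | (me, ml) =>
        (ml,
         (((PySem.List.index? path (PySem.List.pyGetD aln ms ("", "")).2).getD 0 : Nat) : Int),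
         (((PySem.List.index? path (PySem.List.pyGetD aln me ("", "")).2).getD 0 : Nat) : Int))

-- ===== PRECONDITION & SPEC =====
-- Pre_ is EXACTLY the inputs on which Python A returns: aln nonempty, some non-gap entry at or
-- after the start of the earliest longest mismatch run (else the forward gap-trim runs off the
-- end, IndexError), and the two entries the trims land on both present in path (else ValueError).
-- The helpers below are a declarative description of which entries A probes (maximal mismatch
-- runs via filter/takeWhile, earliest longest via max?), not either port's recursion.
def pvSndAt (aln : List (String × String)) (j : Nat) : String := (aln.getD j ("", "")).2
def pvMM (aln : List (String × String)) (j : Nat) : Bool :=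
  (aln.getD j ("", "")).1 != (aln.getD j ("", "")).2
def pvRunLen (aln : List (String × String)) (s : Nat) : Nat :=
  (((List.range aln.length).drop s).takeWhile (pvMM aln)).length
def pvStarts (aln : List (String × String)) : List Nat :=
  (List.range aln.length).filter (fun j => pvMM aln j && (decide (j = 0) || !pvMM aln (j - 1)))
def pvWin (aln : List (String × String)) : Nat × Nat :=
  match PySem.List.max? (pvStarts aln) (fun s => pvRunLen aln s) with
  | some s => (s, s + pvRunLen aln s - 1)
  | none => (0, 0)
def pvProbe1? (aln : List (String × String)) : Option Nat :=
  ((List.range aln.length).drop (pvWin aln).1).find? (fun j => pvSndAt aln j != "-")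
def pvProbe2 (aln : List (String × String)) : Nat :=
  (((List.range ((pvWin aln).2 + 1)).filter (fun j => pvSndAt aln j != "-")).getLast?).getD
    (((((List.range aln.length).filter (fun j => pvSndAt aln j != "-")).getLast?).getD 0))
def Pre_find_max_mismatch (aln : List (String × String)) (path : List String) : Prop :=
  aln ≠ [] ∧ pvProbe1? aln ≠ none ∧
    pvSndAt aln ((pvProbe1? aln).getD 0) ∈ path ∧ pvSndAt aln (pvProbe2 aln) ∈ path
instance (aln : List (String × String)) (path : List String) : Decidable (Pre_find_max_mismatch aln path) := by unfold Pre_find_max_mismatch; infer_instance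

def pvWitness_find_max_mismatch : (List (String × String)) × List String := ([("a", "b")], ["b"])

def Spec_find_max_mismatch (aln : List (String × String)) (path : List String) (out : Int × Int × Int) : Prop := out = find_max_mismatch_alt aln path
instance (aln : List (String × String)) (path : List String) (out : Int × Int × Int) : Decidable (Spec_find_max_mismatch aln path out) := by unfold Spec_find_max_mismatch; infer_instance

-- ===== CLAIM (what is proved, stated in full; the proofs are below) =====
def Claim_equal_find_max_mismatch : Prop := ∀ (aln : List (String × String)) (path : List String), Dom_find_max_mismatch aln path → Pre_find_max_mismatch aln path → Spec_find_max_mismatch aln path (find_max_mismatch aln path)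

-- ===== LEMMAS AND PROOFS =====

-- A's post-loop selection, in projection form
def pvSelA (t : Int × Int × Int × Int × Int × Int) : Int × Int × Int :=
  if t.1 > t.2.2.2.1 then (t.1, t.2.1, t.2.2.1) else (t.2.2.2.1, t.2.2.2.2.1, t.2.2.2.2.2)

-- B's finish + reduction, reordered to A's (max_len, max_s, max_e)
def pvFinB (b : List (Int × Int × Int) × Option Int) (n : Int) : Int × Int × Int :=
  match b.2 with
  | some s0 => ((pvBestRun (b.1 ++ [(s0, n - 1, n - s0)])).2.2,
                (pvBestRun (b.1 ++ [(s0, n - 1, n - s0)])).1,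
                (pvBestRun (b.1 ++ [(s0, n - 1, n - s0)])).2.1)
  | none => ((pvBestRun b.1).2.2, (pvBestRun b.1).1, (pvBestRun b.1).2.1)

lemma pvTrimFwd_eq (aln : List (String × String)) (f : Nat) (sl : Int × Int) :
    pvTrimFwdB aln f sl = pvTrimFwdA aln f sl := by
  induction f generalizing sl with
  | zero => rfl
  | succ f ih =>
    obtain ⟨s, l⟩ := sl
    simp only [pvTrimFwdA, pvTrimFwdB]
    split <;> simp [ih]

lemma pvTrimBwd_eq (aln : List (String × String)) (f : Nat) (sl : Int × Int) :
    pvTrimBwdB aln f sl = pvTrimBwdA aln f sl := by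
  induction f generalizing sl with
  | zero => rfl
  | succ f ih =>
    obtain ⟨s, l⟩ := sl
    simp only [pvTrimBwdA, pvTrimBwdB]
    split <;> simp [ih]

-- the core invariant: A's fused scan and B's runs-then-reduce agree
lemma pvCore (xs : List (String × String)) :
    ∀ (s cl cs ce ml ms me : Int) (rs : List (Int × Int × Int)) (st : Option Int),
    0 ≤ ml →
    pvBestRun rs = (ms, me, ml) →
    (st = none → cl = 0 ∧ cs = s) →
    (∀ s0, st = some s0 → cl = s - s0 ∧ ce = s - 1 ∧ cs = s0 ∧ 0 < cl) →
    pvSelA ((PySem.List.enumerate xs s).foldl pvStepA (cl, cs, ce, ml, ms, me)) =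
      pvFinB ((PySem.List.enumerate xs s).foldl pvStepRuns (rs, st)) (s + xs.length) := by
  induction xs with
  | nil =>
    intro s cl cs ce ml ms me rs st hml hred h0 h1
    simp only [PySem.List.enumerate_nil, List.foldl_nil, List.length_nil]
    cases st with
    | none =>
      obtain ⟨hcl, _⟩ := h0 rfl
      simp [pvSelA, pvFinB, hred, hcl, show ¬ (0 : Int) > ml by omega]
    | some s0 =>
      obtain ⟨hcl, hce, hcs, hpos⟩ := h1 s0 rfl
      simp only [pvSelA, pvFinB, pvBestRun, List.foldl_append]
      rw [show rs.foldl (fun acc r => if r.2.2 > acc.2.2 then r else acc) ((0:Int),(0:Int),(0:Int)) = (ms, me, ml) from hred]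
      rw [hcl, hce, hcs]
      by_cases h : s - s0 > ml <;> simp [h]
  | cons p xs ih =>
    intro s cl cs ce ml ms me rs st hml hred h0 h1
    rw [PySem.List.enumerate_cons]
    simp only [List.foldl_cons, List.length_cons]
    have hn : s + ((xs.length : Int) + 1) = (s + 1) + (xs.length : Int) := by ring
    by_cases hne : p.1 = p.2
    · -- match at index s
      cases st with
      | none =>
        obtain ⟨hcl, hcs⟩ := h0 rfl
        rw [hcl, hcs]
        have := ih (s + 1) 0 (s + 1) ce ml ms me rs none hml hred
          (fun _ => ⟨rfl, rfl⟩) (fun s1 h => by exact absurd h (by simp))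
        simpa [pvStepA, pvStepRuns, hne, hn, show ¬ (0 : Int) > ml by omega] using this
      | some s0 =>
        obtain ⟨hcl, hce, hcs, hpos⟩ := h1 s0 rfl
        rw [hcl, hce, hcs]
        have hred' : pvBestRun (rs ++ [(s0, s - 1, s - s0)]) =
            (if s - s0 > ml then (s0, s - 1, s - s0) else (ms, me, ml)) := by
          simp only [pvBestRun, List.foldl_append]
          rw [show rs.foldl (fun acc r => if r.2.2 > acc.2.2 then r else acc) ((0:Int),(0:Int),(0:Int)) = (ms, me, ml) from hred]
          by_cases h : s - s0 > ml <;> simp [h]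
        by_cases h : s - s0 > ml
        · have := ih (s + 1) 0 (s + 1) (s - 1) (s - s0) s0 (s - 1)
            (rs ++ [(s0, s - 1, s - s0)]) none (by omega)
            (by rw [hred']; simp [h]) (fun _ => ⟨rfl, rfl⟩)
            (fun s1 hs => by exact absurd hs (by simp))
          simpa [pvStepA, pvStepRuns, hne, hn, h] using this
        · have := ih (s + 1) 0 (s + 1) (s - 1) ml ms me
            (rs ++ [(s0, s - 1, s - s0)]) none hml
            (by rw [hred']; simp [h]) (fun _ => ⟨rfl, rfl⟩)
            (fun s1 hs => by exact absurd hs (by simp))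
          simpa [pvStepA, pvStepRuns, hne, hn, h] using this
    · -- mismatch at index s
      cases st with
      | none =>
        obtain ⟨hcl, hcs⟩ := h0 rfl
        rw [hcl, hcs]
        have := ih (s + 1) 1 s s ml ms me rs (some s) hml hred
          (fun h => by exact absurd h (by simp))
          (fun s1 h => by injection h with h2; subst h2; exact ⟨by omega, by omega, rfl, by omega⟩)
        simpa [pvStepA, pvStepRuns, hne, hn] using this
      | some s0 =>
        obtain ⟨hcl, hce, hcs, hpos⟩ := h1 s0 rfl
        rw [hcl, hce, hcs]
        have := ih (s + 1) (s - s0 + 1) s0 s ml ms me rs (some s0) hml hred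
          (fun h => by exact absurd h (by simp))
          (fun s1 h => by injection h with h2; subst h2; exact ⟨by ring, by ring, rfl, by omega⟩)
        simpa [pvStepA, pvStepRuns, hne, hn] using this

-- the two scans produce the same (max_len, max_s, max_e) triple
lemma pvScan_eq (aln : List (String × String)) :
    pvSelA ((PySem.List.pyRange 0 (PySem.List.len aln) 1).foldl
        (fun t i => pvStepA t (i, PySem.List.pyGetD aln i ("", ""))) (0, 0, 0, 0, 0, 0)) =
      ((pvBestRun (pvRunsB aln)).2.2, (pvBestRun (pvRunsB aln)).1, (pvBestRun (pvRunsB aln)).2.1) := by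
  have h1 : (PySem.List.enumerate aln 0).foldl pvStepA ((0:Int), (0:Int), (0:Int), (0:Int), (0:Int), (0:Int)) =
      (PySem.List.pyRange 0 (PySem.List.len aln) 1).foldl
        (fun t i => pvStepA t (i, PySem.List.pyGetD aln i ("", ""))) (0, 0, 0, 0, 0, 0) := by
    rw [PySem.List.enumerate_eq_map_pyRange aln ("", ""), List.foldl_map]
  rw [← h1]
  have h2 := pvCore aln 0 0 0 0 0 0 0 [] none (by omega) rfl
    (by intro _; exact ⟨rfl, rfl⟩) (by intro s0 h; cases h)
  rw [h2]
  simp only [pvFinB, pvRunsB, PySem.List.len, zero_add]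
  rcases hfold : (PySem.List.enumerate aln 0).foldl pvStepRuns ([], none) with ⟨rs, st⟩
  cases st <;> simp

-- ===== VERDICT (by name: the statement is the Claim_ definition above) =====
theorem find_max_mismatch_spec : Claim_equal_find_max_mismatch := by
  intro aln path _ _
  unfold Spec_find_max_mismatch find_max_mismatch find_max_mismatch_alt
  rcases hb : pvBestRun (pvRunsB aln) with ⟨ms, me, ml⟩
  have h := pvScan_eq aln
  rw [hb] at h
  rcases hfold : (PySem.List.pyRange 0 (PySem.List.len aln) 1).foldl
      (fun t i => pvStepA t (i, PySem.List.pyGetD aln i ("", ""))) ((0:Int), (0:Int), (0:Int), (0:Int), (0:Int), (0:Int)) with ⟨cl, cs, ce, ml', ms', me'⟩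
  rw [hfold] at h
  simp only [pvSelA] at h
  dsimp only
  rw [h]
  dsimp only
  rw [pvTrimFwd_eq, pvTrimBwd_eq]
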